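-- pv_equiv track=rewrite | github.com/SaberSHO/AdventOfCode2023 | Day7/main.py | check_five_of_a_kind
-- ===== SOURCE A (Python) =====
-- from collections import defaultdict
--
-- def subJoker(value_count):
--     if value_count['J'] > 0:
--         ##EDGE CASE OF NATURAL 5 OF A KIND OF J
--         if sorted(value_count.values()) == [5]:
--             return value_count
--         tempJ = value_count['J']
--         del value_count['J']
--         value_count[max(value_count,key=value_count.get)] += tempJ
--         return value_count
--     else:
--         del value_count['J']
--         return value_count
--
-- def check_five_of_a_kind(hand):
--     values = [i[0] for i in hand]
--     value_counts = defaultdict(lambda:0)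
--     for v in values:
--         value_counts[v]+=1
--     value_counts = subJoker(value_counts)
--     if sorted(value_counts.values()) == [5]:
--         return True
--     return False
-- ===== SOURCE B (Python) =====
-- def check_five_of_a_kind(hand):
--     # Five of a kind with jokers <=> exactly 5 cards and all non-joker values identical.
--     return len(hand) == 5 and len({v for v, _ in hand if v != 'J'}) <= 1
-- ===== Notes on version B (the rewrite author's own statement) =====
-- stated objective: simpler
-- what changed: Replaces the counting dict, joker reallocation into the max bucket and sorted-values comparison by the direct criterion: 5 cards and at most one distinct non-joker value.
import Mathlib
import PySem

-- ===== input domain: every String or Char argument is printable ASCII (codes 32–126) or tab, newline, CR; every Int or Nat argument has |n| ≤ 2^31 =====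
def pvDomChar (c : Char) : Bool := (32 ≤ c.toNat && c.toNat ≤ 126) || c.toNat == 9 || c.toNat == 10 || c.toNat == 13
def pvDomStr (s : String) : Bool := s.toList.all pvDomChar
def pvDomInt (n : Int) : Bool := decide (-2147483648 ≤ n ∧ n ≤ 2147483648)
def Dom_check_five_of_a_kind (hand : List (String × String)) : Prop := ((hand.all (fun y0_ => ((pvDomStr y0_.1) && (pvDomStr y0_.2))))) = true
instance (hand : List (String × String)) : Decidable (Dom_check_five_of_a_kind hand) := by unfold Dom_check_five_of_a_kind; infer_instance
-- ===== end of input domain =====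

-- B replaces A's counting dict + joker reallocation + sorted-values comparison by the direct
-- criterion "5 cards and at most one distinct non-joker value" (objective: simpler).

-- ===== PORT A =====
-- Port of subJoker. The defaultdict access value_count['J'] inserts the key 'J'→0 when it is
-- absent; that can only happen in the else branch, where `del value_count['J']` removes the
-- freshly inserted key again, so the dict's items are unchanged — the port is exact.
def subJoker (value_count : PySem.Dict String Int) : Option (PySem.Dict String Int) :=
  if value_count.getD "J" 0 > 0 then
    if PySem.List.sorted value_count.values (fun x => x) false == [5] then some value_count
    else
      let tempJ := value_count.getD "J" 0
      let vc := value_count.erase "J"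
      match PySem.List.max? vc.keys (fun k => vc.getD k 0) with
      | none => none  -- max() over an empty dict: Python raises ValueError
      | some m => some (vc.modify m 0 (· + tempJ))
  else
    some (value_count.erase "J")

def check_five_of_a_kind (hand : List (String × String)) : Bool :=
  let values := hand.map (fun i => i.1)
  let value_counts := values.foldl (fun d v => d.modify v 0 (· + 1)) PySem.Dict.empty
  match subJoker value_counts with
  | none => false  -- Python raised ValueError here; excluded by Pre_
  | some vc => if PySem.List.sorted vc.values (fun x => x) false == [5] then true else false

-- ===== PORT B =====
def check_five_of_a_kind_alt (hand : List (String × String)) : Bool :=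
  hand.length == 5 &&
    decide ((PySem.Set.ofList ((hand.filter (fun p => p.1 != "J")).map (fun p => p.1))).length ≤ 1)

-- ===== PRECONDITION & SPEC =====
-- Pre_ excludes exactly the hands on which A raises ValueError: a non-empty hand, all of whose
-- card values are "J", with length ≠ 5 (then subJoker calls max() on an emptied dict).
def Pre_check_five_of_a_kind (hand : List (String × String)) : Prop :=
  hand = [] ∨ hand.length = 5 ∨ ∃ p ∈ hand, p.1 ≠ "J"
instance (hand : List (String × String)) : Decidable (Pre_check_five_of_a_kind hand) := by
  unfold Pre_check_five_of_a_kind; infer_instance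
def pvWitness_check_five_of_a_kind : (List (String × String)) :=
  [("A", "s"), ("A", "h"), ("J", "d"), ("A", "c"), ("A", "s")]

def Spec_check_five_of_a_kind (hand : List (String × String)) (out : Bool) : Prop :=
  out = check_five_of_a_kind_alt hand
instance (hand : List (String × String)) (out : Bool) : Decidable (Spec_check_five_of_a_kind hand out) := by
  unfold Spec_check_five_of_a_kind; infer_instance

-- ===== CLAIM (what is proved, stated in full; the proofs are below) =====
def Claim_equal_check_five_of_a_kind : Prop :=
  ∀ (hand : List (String × String)), Dom_check_five_of_a_kind hand →
    Pre_check_five_of_a_kind hand →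
    Spec_check_five_of_a_kind hand (check_five_of_a_kind hand)

-- ===== LEMMAS AND PROOFS =====

lemma sorted_singleton_iff (xs : List Int) (c : Int) :
    PySem.List.sorted xs (fun x => x) false = [c] ↔ xs = [c] := by
  constructor
  · intro h
    have hp := PySem.List.sorted_perm xs (fun x => x) false
    rw [h] at hp
    exact List.perm_singleton.mp hp.symm
  · rintro rfl; rfl

lemma count_pair (l : List String) (a b : String) (hne : a ≠ b)
    (h : ∀ x ∈ l, x = a ∨ x = b) : l.count a + l.count b = l.length := by
  induction l with
  | nil => simp
  | cons x t ih =>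
    have ht := ih (fun y hy => h y (List.mem_cons_of_mem _ hy))
    rcases h x (by simp) with rfl | rfl
    · rw [List.count_cons_self, List.count_cons_of_ne hne, List.length_cons]
      omega
    · rw [List.count_cons_self, List.count_cons_of_ne (Ne.symm hne), List.length_cons]
      omega

lemma nodup_all_eq {l : List String} {a : String} (hnd : l.Nodup) (hmem : a ∈ l)
    (hall : ∀ x ∈ l, x = a) : l = [a] := by
  cases l with
  | nil => cases hmem
  | cons x t =>
    have hx : x = a := hall x (by simp)
    subst hx
    cases t with
    | nil => rfl
    | cons y s =>
      have hy : y = x := hall y (by simp)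
      subst hy
      simp at hnd

lemma sorted_ne_of_len {xs : List Int} (h : xs.length ≠ 1) :
    (PySem.List.sorted xs (fun x => x) false == [5]) = false := by
  rw [beq_eq_false_iff_ne]
  intro hc
  have := PySem.List.length_sorted xs (fun x => x) false
  rw [hc] at this
  exact h this.symm

-- ===== VERDICT (by name: the statement is the Claim_ definition above) =====
theorem check_five_of_a_kind_spec : Claim_equal_check_five_of_a_kind := by
  intro hand _ hpre
  unfold Spec_check_five_of_a_kind
  simp only [check_five_of_a_kind, check_five_of_a_kind_alt]
  set vs := hand.map (fun i => i.1) with hvs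
  have hfold : (vs.foldl (fun d v => d.modify v 0 (· + 1)) PySem.Dict.empty)
      = PySem.Dict.counter vs := (PySem.Dict.counter_eq_foldl vs).symm
  rw [hfold]
  set d := PySem.Dict.counter vs with hd
  set K0 := PySem.Set.ofList vs with hK0
  set K := K0.filter (fun k => !(k == "J")) with hK
  have hK0nd : K0.Nodup := PySem.Set.nodup_ofList vs
  have hKnd : K.Nodup := hK0nd.filter _
  have hmemK0 : ∀ x, x ∈ K0 ↔ x ∈ vs := fun x => PySem.Set.mem_ofList vs x
  have hmemK : ∀ x, x ∈ K ↔ (x ∈ vs ∧ x ≠ "J") := by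
    intro x
    rw [hK, List.mem_filter, hmemK0]
    simp
  have hBperm : (PySem.Set.ofList ((hand.filter (fun p => p.1 != "J")).map (fun p => p.1))).Perm K := by
    refine (List.perm_ext_iff_of_nodup (PySem.Set.nodup_ofList _) hKnd).mpr ?_
    intro x
    rw [PySem.Set.mem_ofList, hmemK]
    simp only [List.mem_map, List.mem_filter, hvs, bne_iff_ne, ne_eq]
    constructor
    · rintro ⟨p, ⟨hp, hne⟩, rfl⟩
      exact ⟨⟨p, hp, rfl⟩, hne⟩
    · rintro ⟨⟨p, hp, rfl⟩, hne⟩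
      exact ⟨p, ⟨hp, hne⟩, rfl⟩
  have hBlen : (PySem.Set.ofList ((hand.filter (fun p => p.1 != "J")).map (fun p => p.1))).length = K.length :=
    hBperm.length_eq
  rw [hBlen]
  have hlen : vs.length = hand.length := by rw [hvs, List.length_map]
  have hvals : d.values = K0.map (fun k => (vs.count k : Int)) := by
    show (List.map (fun x => x.2) d.items) = _
    rw [hd, PySem.Dict.items_counter, List.map_map]
    rfl
  have hgetJ : d.getD "J" 0 = (vs.count "J" : Int) := PySem.Dict.getD_counter vs "J"
  unfold subJoker
  rw [hgetJ]
  by_cases hJ : (0 : Int) < (vs.count "J" : Int)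
  · -- count "J" > 0 : "J" ∈ vs
    have hJmem : "J" ∈ vs := by
      rw [← List.count_pos_iff]
      exact_mod_cast hJ
    rw [if_pos hJ]
    by_cases hnat : (PySem.List.sorted d.values (fun x => x) false == [5]) = true
    · -- natural five of a kind of J
      rw [if_pos hnat]
      simp only [hnat, if_true]
      -- show B is true as well
      have h5 : d.values = [5] := by
        rw [← sorted_singleton_iff]
        exact eq_of_beq hnat
      rw [hvals] at h5
      obtain ⟨k, hk0, hcnt⟩ : ∃ k, K0 = [k] ∧ (vs.count k : Int) = 5 := by
        cases hK0e : K0 with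
        | nil => rw [hK0e] at h5; simp at h5
        | cons a t =>
          cases t with
          | nil =>
            rw [hK0e] at h5
            simp at h5
            exact ⟨a, rfl, h5⟩
          | cons b s => rw [hK0e] at h5; simp at h5
      have hkJ : k = "J" := by
        have : "J" ∈ K0 := (hmemK0 "J").mpr hJmem
        rw [hk0] at this
        exact (List.mem_singleton.mp this).symm
      subst hkJ
      have hall : ∀ x ∈ vs, x = "J" := by
        intro x hx
        have : x ∈ K0 := (hmemK0 x).mpr hx
        rw [hk0] at this
        simpa using this
      have hcl : vs.count "J" = vs.length := List.count_eq_length.mpr (fun b hb => (hall b hb).symm)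
      have hn5 : hand.length = 5 := by
        rw [← hlen, ← hcl]
        exact_mod_cast hcnt
      have hKnil : K = [] := by
        rw [List.eq_nil_iff_forall_not_mem]
        intro x hx
        obtain ⟨hxv, hxne⟩ := (hmemK x).mp hx
        exact hxne (hall x hxv)
      rw [hKnil, hn5]
      decide
    · -- joker reallocation
      rw [if_neg hnat]
      dsimp only
      have hitems' : (d.erase "J").items = K.map (fun k => (k, (vs.count k : Int))) := by
        show List.filter _ d.items = _
        rw [hd, PySem.Dict.items_counter, List.filter_map]
        rfl
      have hkeys' : (d.erase "J").keys = K := by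
        show List.map (fun x => x.1) (d.erase "J").items = K
        rw [hitems', List.map_map]
        show K.map (fun k => k) = K
        exact List.map_id' K
      have hget' : ∀ k ∈ K, (d.erase "J").getD k 0 = (vs.count k : Int) := by
        intro k hkK
        refine PySem.Dict.getD_of_mem_items (d.erase "J") ?_ ?_ 0
        · rw [hitems']
          exact List.mem_map_of_mem hkK
        · rw [hkeys']; exact hKnd
      cases hKe : K with
      | nil =>
        -- A raised ValueError: excluded by Pre_
        exfalso
        have hall : ∀ x ∈ vs, x = "J" := by
          intro x hx
          by_contra hne
          have : x ∈ K := (hmemK x).mpr ⟨hx, hne⟩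
          rw [hKe] at this
          simp at this
        have hhand : hand ≠ [] := by
          intro h
          rw [h] at hvs
          simp [hvs] at hJmem
        have hn5 : hand.length = 5 := by
          rcases hpre with h | h | ⟨p, hp, hne⟩
          · exact absurd h hhand
          · exact h
          · exact absurd (hall p.1 (by rw [hvs]; exact List.mem_map_of_mem hp)) hne
        -- then it is a natural five of a kind of J, contradicting hnat
        have hK0J : K0 = ["J"] :=
          nodup_all_eq hK0nd ((hmemK0 "J").mpr hJmem)
            (fun x hx => hall x ((hmemK0 x).mp hx))
        have hcl : vs.count "J" = vs.length := List.count_eq_length.mpr (fun b hb => (hall b hb).symm)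
        have : d.values = [5] := by
          rw [hvals, hK0J]
          simp [hcl, hlen, hn5]
        apply hnat
        rw [← sorted_singleton_iff (c := 5)] at this
        exact beq_iff_eq.mpr this
      | cons k0 rest =>
        -- max? over nonempty keys
        have hne : (d.erase "J").keys ≠ [] := by rw [hkeys', hKe]; simp
        obtain ⟨m, hm⟩ : ∃ m, PySem.List.max? (d.erase "J").keys (fun k => (d.erase "J").getD k 0) = some m := by
          cases hmx : PySem.List.max? (d.erase "J").keys (fun k => (d.erase "J").getD k 0) with
          | none => exact absurd ((PySem.List.max?_eq_none_iff _ _).mp hmx) hne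
          | some m => exact ⟨m, rfl⟩
        have hmK : m ∈ K := by
          rw [← hkeys']
          exact PySem.List.max?_mem hm
        rw [hm]
        dsimp only
        have hcont : (d.erase "J").contains m = true := by
          rw [PySem.Dict.contains_iff_mem_keys, hkeys']
          exact hmK
        have hmod : ((d.erase "J").modify m 0 (· + (vs.count "J" : Int))).values
            = K.map (fun k => if k == m then (vs.count m : Int) + (vs.count "J" : Int) else (vs.count k : Int)) := by
          show List.map (fun x => x.2) ((d.erase "J").insert m _).items = _
          rw [PySem.Dict.items_insert_of_contains _ _ hcont, hitems', List.map_map, List.map_map]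
          rw [hget' m hmK]
          apply List.map_congr_left
          intro k hkK
          by_cases hkm : k = m <;> simp [hkm]
        cases hre : rest with
        | nil =>
          -- single non-J value k0; m = k0
          have hmk0 : m = k0 := by
            rw [hKe, hre] at hmK
            simpa using hmK
          subst hmk0
          have hk0K : m ∈ K := by rw [hKe, hre]; simp
          have hk0nJ : m ≠ "J" := ((hmemK m).mp hk0K).2
          have hcp : vs.count m + vs.count "J" = vs.length := by
            refine count_pair vs m "J" hk0nJ ?_
            intro x hx
            by_cases hxJ : x = "J"
            · exact Or.inr hxJ
            · have : x ∈ K := (hmemK x).mpr ⟨hx, hxJ⟩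
              rw [hKe, hre] at this
              simp at this
              exact Or.inl this
          have hv2 : ((d.erase "J").modify m 0 (· + (vs.count "J" : Int))).values
              = [(vs.count m : Int) + (vs.count "J" : Int)] := by
            rw [hmod, hKe, hre]
            simp
          rw [hv2]
          have : ((vs.count m : Int) + (vs.count "J" : Int)) = (hand.length : Int) := by
            rw [← hlen]
            exact_mod_cast hcp
          rw [this]
          by_cases h5 : hand.length = 5
          · rw [h5]
            simp
            rfl
          · have hA : (PySem.List.sorted [(hand.length : Int)] (fun x => x) false == [5]) = false := by
              rw [beq_eq_false_iff_ne]
              rw [Ne, sorted_singleton_iff]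
              intro hc
              simp at hc
              exact h5 (by exact_mod_cast hc)
            have hb5 : (hand.length == 5) = false := by simpa using h5
            rw [hA, hb5]
            simp
        | cons k1 rest' =>
          -- at least two distinct non-J values: both sides false
          have hlenK : K.length ≠ 1 := by rw [hKe, hre]; simp
          have hA : (PySem.List.sorted ((d.erase "J").modify m 0 (· + (vs.count "J" : Int))).values (fun x => x) false == [5]) = false := by
            apply sorted_ne_of_len
            rw [hmod, List.length_map]
            exact hlenK
          have hB : ¬((k0 :: k1 :: rest').length ≤ 1) := by
            simp only [List.length_cons]
            omega
          rw [hA, decide_eq_false hB]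
          simp
  · -- no jokers: erase "J" is the identity on the items
    rw [if_neg hJ]
    have hJ0 : vs.count "J" = 0 := by
      by_contra h
      exact hJ (by exact_mod_cast Nat.pos_of_ne_zero h)
    have hJnm : "J" ∉ vs := List.count_eq_zero.mp hJ0
    have herase : d.erase "J" = d := by
      apply PySem.Dict.ext
      show List.filter _ d.items = d.items
      apply List.filter_eq_self.mpr
      intro p hp
      have : p.1 ∈ K0 := by
        rw [hd, PySem.Dict.items_counter] at hp
        obtain ⟨k, hk, rfl⟩ := List.mem_map.mp hp
        exact hk
      have : p.1 ≠ "J" := fun h => hJnm (h ▸ (hmemK0 p.1).mp this)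
      simpa using this
    rw [herase]
    dsimp only
    have hKK0 : K = K0 := by
      rw [hK]
      apply List.filter_eq_self.mpr
      intro k hk
      have : k ≠ "J" := fun h => hJnm (h ▸ (hmemK0 k).mp hk)
      simpa using this
    rw [hKK0] at *
    cases hK0e : K0 with
    | nil =>
      have hhe : hand = [] := by
        have : vs = [] := by
          rw [List.eq_nil_iff_forall_not_mem]
          intro x hx
          have : x ∈ K0 := (hmemK0 x).mpr hx
          rw [hK0e] at this
          simp at this
        cases hhe : hand with
        | nil => rfl
        | cons a t =>
          rw [hhe] at hvs
          simp [hvs] at this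
      rw [hvals, hK0e, hhe]
      simp [show PySem.List.sorted ([] : List Int) (fun x : Int => x) false = [] from rfl]
    | cons k0 rest =>
      cases hre : rest with
      | nil =>
        have hall : ∀ x ∈ vs, x = k0 := by
          intro x hx
          have : x ∈ K0 := (hmemK0 x).mpr hx
          rw [hK0e, hre] at this
          simpa using this
        have hcl : vs.count k0 = vs.length := List.count_eq_length.mpr (fun b hb => (hall b hb).symm)
        rw [hvals, hK0e, hre]
        simp only [List.map_cons, List.map_nil]
        simp only [hcl, hlen]
        by_cases h5 : hand.length = 5
        · rw [h5]
          simp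
          rfl
        · have hA : (PySem.List.sorted [(hand.length : Int)] (fun x => x) false == [5]) = false := by
            rw [beq_eq_false_iff_ne]
            rw [Ne, sorted_singleton_iff]
            intro hc
            simp at hc
            exact h5 (by exact_mod_cast hc)
          have hb5 : (hand.length == 5) = false := by simpa using h5
          rw [hA, hb5]
          simp
      | cons k1 rest' =>
        have hA : (PySem.List.sorted d.values (fun x => x) false == [5]) = false := by
          apply sorted_ne_of_len
          rw [hvals, List.length_map, hK0e, hre]
          simp
        have hB : ¬((k0 :: k1 :: rest').length ≤ 1) := by
          simp only [List.length_cons]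
          omega
        rw [hA, decide_eq_false hB]
        simp
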